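-- pv_equiv track=rewrite | github.com/dsav123/medproc | medproc/algo.py | specdiag
-- ===== SOURCE A (Python) =====
-- import itertools
-- from collections import Counter, OrderedDict
--
-- def counting(data):
--     return Counter(data)
--
-- def specdiag(dataset, diag):
--     a = [list(group) for k, group in itertools.groupby(dataset, lambda x: x[0])]
--     counterholder =[]
--     test = []
--     for c in a:
--         for d in c:
--             test.append(d[2])
--         counterholder.append((d[0], counting(test)))
--         test = []
--     diagcount = []
--     for i in counterholder:
--         diagcount.append((i[0], i[1][diag]))
--
--     return diagcount
-- ===== SOURCE B (Python) =====
-- from collections import deque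
--
-- def specdiag(dataset, diag):
--     out = deque()
--     for row in reversed(dataset):
--         key = row[0]
--         hit = 1 if row[2] == diag else 0
--         if out and out[0][0] == key:
--             out[0] = (key, out[0][1] + hit)
--         else:
--             out.appendleft((key, hit))
--     return list(out)
-- ===== Notes on version B (the rewrite author's own statement) =====
-- stated objective: alternative
-- what changed: Traverses the dataset back-to-front, merging each row into the front group of a deque-built output, instead of A's staged passes with groupby-materialized group lists and per-group Counters.
import Mathlib
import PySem

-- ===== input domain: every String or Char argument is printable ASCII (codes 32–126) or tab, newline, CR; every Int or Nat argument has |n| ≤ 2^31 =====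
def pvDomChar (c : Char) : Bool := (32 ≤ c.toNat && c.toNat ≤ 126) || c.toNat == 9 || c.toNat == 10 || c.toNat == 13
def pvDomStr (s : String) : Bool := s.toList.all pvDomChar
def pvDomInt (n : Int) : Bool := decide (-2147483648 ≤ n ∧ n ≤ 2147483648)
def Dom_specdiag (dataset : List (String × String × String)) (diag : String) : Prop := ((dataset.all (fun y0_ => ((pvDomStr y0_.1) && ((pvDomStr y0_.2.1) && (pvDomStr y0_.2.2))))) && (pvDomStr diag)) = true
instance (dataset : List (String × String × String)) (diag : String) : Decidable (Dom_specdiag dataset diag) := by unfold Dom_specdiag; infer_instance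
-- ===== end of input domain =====

-- B replaces A's staged passes (groupby-materialized group lists, per-group Counter,
-- then a lookup pass) by a single back-to-front traversal that merges each row into
-- the front group of the output being built (objective: alternative).

-- ===== PORT A =====
-- itertools.groupby(dataset, lambda x: x[0]) materialized as list of runs
def groupRuns : List (String × String × String) → List (List (String × String × String))
  | [] => []
  | x :: xs =>
      (x :: xs.takeWhile (fun y => y.1 == x.1)) :: groupRuns (xs.dropWhile (fun y => y.1 == x.1))
  termination_by l => l.length
  decreasing_by
    simp only [List.length_cons]
    have := List.length_dropWhile_le (p := fun y => y.1 == x.1) (l := xs)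
    omega

-- def counting(data): return Counter(data)
def counting (data : List String) : PySem.Dict String Int := PySem.Dict.counter data

def specdiag (dataset : List (String × String × String)) (diag : String) : List (String × Int) :=
  let a := groupRuns dataset
  -- loop building counterholder; d after the inner loop is the LAST element of c
  let counterholder := a.foldl (fun acc c =>
    let test := c.foldl (fun t d => t ++ [d.2.2]) []
    acc ++ [((c.getLastD ("", "", "")).1, counting test)]) []
  -- Counter.__getitem__ returns 0 for a missing key
  counterholder.foldl (fun acc i => acc ++ [(i.1, i.2.getD diag 0)]) []

-- ===== PORT B =====
-- one step of Source B's reversed loop: merge a row into the front of the output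
def mergeStep (diag : String) (row : String × String × String)
    (out : List (String × Int)) : List (String × Int) :=
  let hit : Int := if row.2.2 = diag then 1 else 0
  match out with
  | [] => [(row.1, hit)]
  | (k, c) :: rest =>
      if k = row.1 then (row.1, c + hit) :: rest else (row.1, hit) :: (k, c) :: rest

-- the reversed-iteration deque build is a right fold over the dataset
def specdiag_alt (dataset : List (String × String × String)) (diag : String) : List (String × Int) :=
  dataset.foldr (mergeStep diag) []

-- ===== PRECONDITION & SPEC =====
def Spec_specdiag (dataset : List (String × String × String)) (diag : String) (out : List (String × Int)) : Prop := out = specdiag_alt dataset diag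
instance (dataset : List (String × String × String)) (diag : String) (out : List (String × Int)) : Decidable (Spec_specdiag dataset diag out) := by unfold Spec_specdiag; infer_instance

-- ===== CLAIM (what is proved, stated in full; the proofs are below) =====
def Claim_equal_specdiag : Prop := ∀ (dataset : List (String × String × String)) (diag : String), Dom_specdiag dataset diag → Spec_specdiag dataset diag (specdiag dataset diag)

-- ===== LEMMAS AND PROOFS =====

-- a foldl that only pushes elements is a map
theorem foldl_push {α β : Type} (f : α → β) :
    ∀ (l : List α) (init : List β), l.foldl (fun acc a => acc ++ [f a]) init = init ++ l.map f
  | [], init => by simp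
  | a :: l, init => by
      simp [List.foldl_cons, foldl_push f l]

theorem getLastD_cons_mem {α : Type} : ∀ (x : α) (l : List α) (d : α), (x :: l).getLastD d ∈ x :: l
  | _, [], _ => by simp [List.getLastD]
  | x, y :: l, d => by
      have := getLastD_cons_mem y l d
      simp only [List.getLastD]
      exact List.mem_cons_of_mem _ this

-- A's value as a map over the runs
theorem specdiag_eq (dataset : List (String × String × String)) (diag : String) :
    specdiag dataset diag =
      (groupRuns dataset).map (fun c =>
        ((c.getLastD ("", "", "")).1, ((c.map (fun d => d.2.2)).count diag : Int))) := by
  show List.foldl (fun acc i => acc ++ [(i.1, i.2.getD diag 0)]) []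
      (List.foldl (fun acc c => acc ++ [((c.getLastD ("", "", "")).1,
          PySem.Dict.counter (List.foldl (fun t d => t ++ [d.2.2]) [] c))]) [] (groupRuns dataset)) = _
  rw [foldl_push (fun c : List (String × String × String) =>
        ((c.getLastD ("", "", "")).1, PySem.Dict.counter (c.foldl (fun t d => t ++ [d.2.2]) []))),
      foldl_push (fun i : String × PySem.Dict String Int => (i.1, i.2.getD diag 0))]
  simp only [List.nil_append, List.map_map]
  refine List.map_congr_left (fun c _ => ?_)
  simp [foldl_push (fun d : String × String × String => d.2.2), PySem.Dict.getD_counter]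

-- B's result on a nonempty list starts with the first row's key
theorem alt_head (diag : String) (r : String × String × String)
    (rs : List (String × String × String)) :
    ∃ c t, specdiag_alt (r :: rs) diag = (r.1, c) :: t := by
  show ∃ c t, mergeStep diag r (specdiag_alt rs diag) = (r.1, c) :: t
  unfold mergeStep
  cases specdiag_alt rs diag with
  | nil => exact ⟨_, _, rfl⟩
  | cons p rest =>
      obtain ⟨k, c⟩ := p
      by_cases h : k = r.1 <;> simp [h]

-- folding a nonempty run of key k onto a list whose head key is not k
-- prepends (k, number of diag hits in the run)
theorem foldr_run (diag : String) (k : String) :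
    ∀ (run : List (String × String × String)) (L : List (String × Int)),
      run ≠ [] → (∀ y ∈ run, y.1 = k) → (∀ p ∈ L.head?, p.1 ≠ k) →
      run.foldr (mergeStep diag) L = (k, ((run.map (fun d => d.2.2)).count diag : Int)) :: L
  | [], _, hne, _, _ => absurd rfl hne
  | a :: run, L, _, hk, hL => by
      have ha : a.1 = k := hk a (by simp)
      cases run with
      | nil =>
          simp only [List.foldr_cons, List.foldr_nil]
          unfold mergeStep
          cases L with
          | nil =>
              simp [ha]
              by_cases hd : a.2.2 = diag <;> simp [hd, List.count_cons]
          | cons p rest =>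
              obtain ⟨k', c'⟩ := p
              have : k' ≠ k := hL (k', c') (by simp)
              simp [ha, this]
              by_cases hd : a.2.2 = diag <;> simp [hd]
      | cons b run' =>
          have hrest : ∀ y ∈ b :: run', y.1 = k := fun y hy => hk y (by simp [List.mem_cons] at hy ⊢; tauto)
          have ih := foldr_run diag k (b :: run') L (by simp) hrest hL
          simp only [List.foldr_cons] at ih ⊢
          rw [ih]
          unfold mergeStep
          simp [ha]
          by_cases hd : a.2.2 = diag <;> simp [hd] <;> omega

theorem main_eq (diag : String) :
    ∀ (dataset : List (String × String × String)),
      specdiag dataset diag = specdiag_alt dataset diag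
  | [] => by simp [specdiag_eq, groupRuns, specdiag_alt]
  | x :: xs => by
      have ih := main_eq diag (xs.dropWhile (fun y => y.1 == x.1))
      have hsplit : x :: xs =
          (x :: xs.takeWhile (fun y => y.1 == x.1)) ++ xs.dropWhile (fun y => y.1 == x.1) := by
        simp [List.takeWhile_append_dropWhile]
      have hrun : ∀ y ∈ x :: xs.takeWhile (fun y => y.1 == x.1), y.1 = x.1 := by
        intro y hy
        rcases List.mem_cons.mp hy with h | h
        · rw [h]
        · simpa using List.mem_takeWhile_imp h
      have hlast : (((x :: xs.takeWhile (fun y => y.1 == x.1)).getLastD ("", "", ""))).1 = x.1 :=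
        hrun _ (getLastD_cons_mem x _ _)
      have hhead : ∀ p ∈ (specdiag_alt (xs.dropWhile (fun y => y.1 == x.1)) diag).head?,
          p.1 ≠ x.1 := by
        intro p hp
        cases hdrop : xs.dropWhile (fun y => y.1 == x.1) with
        | nil => simp [hdrop, specdiag_alt] at hp
        | cons r rs =>
            obtain ⟨c, t, ht⟩ := alt_head diag r rs
            rw [hdrop, ht] at hp
            simp only [Option.mem_def, List.head?_cons, Option.some.injEq] at hp
            have hr : ¬ (r.1 == x.1) = true := by
              have := List.head?_dropWhile_not (p := fun y => y.1 == x.1) (l := xs)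
              rw [hdrop] at this
              simpa using this
            cases hp
            simpa using hr
      -- A side: first run contributes one pair, rest by IH
      rw [specdiag_eq]
      unfold groupRuns
      rw [List.map_cons, ← specdiag_eq _ diag, ih, hlast]
      -- B side: split the fold along the first run
      conv_rhs => rw [hsplit]
      unfold specdiag_alt
      rw [List.foldr_append]
      exact (foldr_run diag x.1 _ _ (by simp) hrun hhead).symm
  termination_by l => l.length
  decreasing_by
    simp only [List.length_cons]
    have := List.length_dropWhile_le (p := fun y => y.1 == x.1) (l := xs)
    omega

-- ===== VERDICT (by name: the statement is the Claim_ definition above) =====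
theorem specdiag_spec : Claim_equal_specdiag := by
  intro dataset diag _
  unfold Spec_specdiag
  exact main_eq diag dataset
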